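-- pv_equiv track=rewrite | github.com/ivvve/code-examples | py-algorithm/sss/num2.py | solution
-- ===== SOURCE A (Python) =====
-- import collections
--
-- def solution(grades):
--     # 점수와 해당 점수의 학생 수를 구한다
--     grade_and_student_numbers = collections.defaultdict(get_0)
--
--     for grade in grades:
--         grade_and_student_numbers[grade] += 1
--
--     grade_and_student_numbers = sorted(grade_and_student_numbers.items(), reverse=True)
--
--     # 점수와 해당 점수의 순위를 구한다
--     number = 1
--     grade_and_numbers = {}
--
--     for grande_and_student_number in grade_and_student_numbers:
--         grade_and_numbers[grande_and_student_number[0]] = number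
--         number += grande_and_student_number[1]
--
--     # 점수와 해당 점수의 순위를 매핑한다
--     answer = []
--
--     for grade in grades:
--         answer.append(grade_and_numbers[grade])
--
--     return answer
--
-- def get_0():
--     return 0
-- ===== SOURCE B (Python) =====
-- def solution(grades):
--     # competition rank of g = 1 + number of strictly greater grades
--     return [1 + len([x for x in grades if x > g]) for g in grades]
-- ===== Notes on version B (the rewrite author's own statement) =====
-- stated objective: simpler
-- what changed: Replaces the Counter, the descending sort of distinct grades and the grade-to-rank table with a one-line direct definition: each grade's rank is 1 plus the number of strictly greater grades.
import Mathlib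
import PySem

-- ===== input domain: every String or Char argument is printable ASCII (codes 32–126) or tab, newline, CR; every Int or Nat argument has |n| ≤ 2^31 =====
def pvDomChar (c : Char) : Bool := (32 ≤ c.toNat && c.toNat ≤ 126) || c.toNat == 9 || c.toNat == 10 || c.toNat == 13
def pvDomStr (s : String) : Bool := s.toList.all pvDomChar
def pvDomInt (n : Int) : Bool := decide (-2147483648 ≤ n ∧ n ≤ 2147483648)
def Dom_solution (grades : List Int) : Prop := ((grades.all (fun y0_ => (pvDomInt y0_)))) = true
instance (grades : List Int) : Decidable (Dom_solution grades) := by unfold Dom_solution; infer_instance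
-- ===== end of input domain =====

-- B replaces A's Counter + descending sort + grade→rank table by the direct
-- definition "rank of g = 1 + number of strictly greater grades" (simpler, not faster).

-- ===== PORT A =====
def solution (grades : List Int) : List Int :=
  -- defaultdict(get_0) counting loop: grade_and_student_numbers[grade] += 1
  let counter := grades.foldl (fun d g => d.modify g 0 (· + 1)) (PySem.Dict.empty : PySem.Dict Int Int)
  -- sorted(items, reverse=True): the first components (dict keys) are distinct, so
  -- Python's tuple comparison is decided by the first component — key = fst is exact here
  let items := PySem.List.sorted counter.items (fun p => p.1) true
  -- number = 1; for (grade, cnt) in items: ranks[grade] = number; number += cnt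
  let ranks := (items.foldl (fun (p : PySem.Dict Int Int × Int) it =>
      (p.1.insert it.1 p.2, p.2 + it.2)) ((PySem.Dict.empty : PySem.Dict Int Int), 1)).1
  -- grade_and_numbers[grade]: the key is always present (every grade was counted), so getD is exact
  grades.foldl (fun acc g => acc ++ [ranks.getD g 0]) []

-- ===== PORT B =====
def solution_alt (grades : List Int) : List Int :=
  grades.map (fun g => 1 + ((grades.filter (fun x => decide (g < x))).length : Int))

-- ===== PRECONDITION & SPEC =====
def Spec_solution (grades : List Int) (out : List Int) : Prop := out = solution_alt grades
instance (grades : List Int) (out : List Int) : Decidable (Spec_solution grades out) := by unfold Spec_solution; infer_instance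

-- ===== CLAIM (what is proved, stated in full; the proofs are below) =====
def Claim_equal_solution : Prop := ∀ (grades : List Int), Dom_solution grades → Spec_solution grades (solution grades)

-- ===== LEMMAS AND PROOFS =====

-- the rank-building fold does not touch keys it never sees
theorem rankFold_get?_not_mem (l : List (Int × Int)) (d : PySem.Dict Int Int) (n : Int)
    (g : Int) (hg : g ∉ l.map (·.1)) :
    ((l.foldl (fun (p : PySem.Dict Int Int × Int) it =>
      (p.1.insert it.1 p.2, p.2 + it.2)) (d, n)).1).get? g = d.get? g := by
  induction l generalizing d n with
  | nil => rfl
  | cons hd t ih =>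
    simp only [List.map_cons, List.mem_cons, not_or] at hg
    simp only [List.foldl_cons]
    rw [ih _ _ hg.2, PySem.Dict.get?_insert_of_ne _ _ hg.1]

-- on a strictly descending items list the fold assigns 1 + (counts of all earlier = larger keys)
theorem rankFold_getD (l : List (Int × Int)) (d : PySem.Dict Int Int) (n : Int) (g : Int)
    (hp : (l.map (·.1)).Pairwise (· > ·)) (hg : g ∈ l.map (·.1)) :
    ((l.foldl (fun (p : PySem.Dict Int Int × Int) it =>
      (p.1.insert it.1 p.2, p.2 + it.2)) (d, n)).1).getD g 0
      = n + ((l.filter (fun p => decide (g < p.1))).map (·.2)).sum := by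
  induction l generalizing d n with
  | nil => simp at hg
  | cons hd t ih =>
    simp only [List.map_cons, List.pairwise_cons] at hp
    simp only [List.foldl_cons]
    rcases List.mem_cons.mp hg with hgk | hgt
    · -- g is the head key: nothing later touches it, nothing earlier or later is greater
      subst hgk
      have hnot : hd.1 ∉ t.map (·.1) := fun hm => lt_irrefl _ (hp.1 _ hm)
      rw [PySem.Dict.getD_eq_get?_getD, rankFold_get?_not_mem _ _ _ _ hnot,
          PySem.Dict.get?_insert_self]
      have hfil : t.filter (fun p => decide (hd.1 < p.1)) = [] := by
        rw [List.filter_eq_nil_iff]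
        intro p hpmem
        have := hp.1 _ (List.mem_map_of_mem hpmem)
        simp only [decide_eq_true_eq]
        omega
      simp [hfil]
    · -- g is further down: head key is strictly greater, contributes its count
      have hgt' : hd.1 > g := hp.1 _ hgt
      rw [ih _ _ hp.2 hgt]
      have : (decide (g < hd.1)) = true := by simpa using hgt'
      simp only [List.filter_cons, this, if_true, List.map_cons, List.sum_cons]
      ring

-- a 0/1 indicator summed over a duplicate-free list
theorem sum_ite_mem (M : List Int) (x : Int) (hnd : M.Nodup) :
    (M.map (fun k => if k = x then (1 : Int) else 0)).sum = if x ∈ M then 1 else 0 := by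
  induction M with
  | nil => simp
  | cons m t ih =>
    rcases List.nodup_cons.mp hnd with ⟨hm, hnd'⟩
    by_cases hmx : m = x
    · subst hmx
      have : (t.map (fun k => if k = m then (1 : Int) else 0)).sum = 0 := by
        rw [ih hnd']; simp [hm]
      simp [this]
    · have hx : (x ∈ m :: t) ↔ x ∈ t := by
        rw [List.mem_cons]
        exact or_iff_right (fun h => hmx h.symm)
      simp only [List.map_cons, List.sum_cons, if_neg hmx, zero_add, ih hnd', hx]

-- summing the multiplicities of the distinct values satisfying p counts the p-satisfying elements
theorem sum_count_filter (L : List Int) (xs : List Int) (p : Int → Bool)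
    (hnd : L.Nodup) (hsub : ∀ x ∈ xs, x ∈ L) :
    ((L.filter p).map (fun k => (xs.count k : Int))).sum = ((xs.countP p : Nat) : Int) := by
  induction xs with
  | nil => simp
  | cons x t ih =>
    have hx : x ∈ L := hsub x (List.mem_cons_self)
    have hsub' : ∀ y ∈ t, y ∈ L := fun y hy => hsub y (List.mem_cons_of_mem _ hy)
    have hsplit : ∀ k : Int, (((x :: t).count k : Nat) : Int)
        = (t.count k : Int) + (if k = x then 1 else 0) := by
      intro k
      rw [List.count_cons]
      by_cases h : k = x
      · simp [h]
      · simp [h, Ne.symm h]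
    calc ((L.filter p).map (fun k => ((x :: t).count k : Int))).sum
        = ((L.filter p).map (fun k => (t.count k : Int) + (if k = x then 1 else 0))).sum := by
          exact congrArg List.sum (List.map_congr_left (fun k _ => hsplit k))
      _ = ((L.filter p).map (fun k => (t.count k : Int))).sum
          + ((L.filter p).map (fun k => if k = x then (1 : Int) else 0)).sum := by
          rw [PySem.List.sum_map_add_int]
      _ = ((t.countP p : Nat) : Int) + (if x ∈ L.filter p then 1 else 0) := by
          rw [ih hsub', sum_ite_mem _ _ (hnd.filter p)]
      _ = (((x :: t).countP p : Nat) : Int) := by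
          have : (x ∈ L.filter p) ↔ p x = true := by
            simp [List.mem_filter, hx]
          rw [List.countP_cons]
          by_cases hpx : p x = true <;> simp [hpx, this]

-- the rank dict looks up to 1 + (number of strictly greater grades), for every grade present
theorem ranks_getD (grades : List Int) (g : Int) (hg : g ∈ grades) :
    (((PySem.List.sorted (PySem.Dict.counter grades).items (fun p => p.1) true).foldl
        (fun (p : PySem.Dict Int Int × Int) it => (p.1.insert it.1 p.2, p.2 + it.2))
        ((PySem.Dict.empty : PySem.Dict Int Int), 1)).1).getD g 0
      = 1 + ((grades.filter (fun x => decide (g < x))).length : Int) := by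
  -- name the sorted items list: D.map (k ↦ (k, count k)) with D the distinct grades descending
  set D := PySem.List.sorted (PySem.Set.ofList grades) (fun x => x) true with hD
  have hDperm : D.Perm (PySem.Set.ofList grades) := PySem.List.sorted_perm _ _ _
  have hDnodup : D.Nodup := hDperm.nodup_iff.mpr (PySem.Set.nodup_ofList grades)
  have hDdesc : D.Pairwise (· > ·) := by
    have h1 : D.Pairwise (fun a b => b ≤ a) := PySem.List.sorted_pairwise_rev _ _
    exact (h1.and hDnodup).imp (fun h => lt_of_le_of_ne h.1 (fun he => h.2 he.symm))
  have hsorted : PySem.List.sorted (PySem.Dict.counter grades).items (fun p => p.1) true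
      = D.map (fun k => (k, (grades.count k : Int))) := by
    apply PySem.List.sorted_rev_eq_of_perm_of_pairwise_gt
    · rw [PySem.Dict.items_counter]
      exact hDperm.map _
    · rw [List.pairwise_map]
      exact hDdesc
  have hmem : g ∈ (D.map (fun k => (k, (grades.count k : Int)))).map (·.1) := by
    simp only [List.map_map]
    simpa using hDperm.mem_iff.mpr ((PySem.Set.mem_ofList _ _).mpr hg)
  have hpair : ((D.map (fun k => (k, (grades.count k : Int)))).map (·.1)).Pairwise (· > ·) := by
    simp only [List.map_map]
    simpa [List.pairwise_map] using hDdesc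
  rw [hsorted, rankFold_getD _ _ _ _ hpair hmem]
  congr 1
  -- filter over the mapped pairs = mapped filter over D
  rw [List.filter_map, List.map_map]
  calc ((D.filter ((fun p : Int × Int => decide (g < p.1)) ∘ fun k => (k, (grades.count k : Int)))).map
          ((fun p : Int × Int => p.2) ∘ fun k => (k, (grades.count k : Int)))).sum
      = ((D.filter (fun k => decide (g < k))).map (fun k => (grades.count k : Int))).sum := rfl
    _ = ((grades.countP (fun x => decide (g < x)) : Nat) : Int) := by
        exact sum_count_filter D grades _ hDnodup
          (fun x hx => hDperm.mem_iff.mpr ((PySem.Set.mem_ofList _ _).mpr hx))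
    _ = ((grades.filter (fun x => decide (g < x))).length : Int) := by
        rw [List.countP_eq_length_filter]

-- ===== VERDICT (by name: the statement is the Claim_ definition above) =====
theorem solution_spec : Claim_equal_solution := by
  intro grades _
  show solution grades = solution_alt grades
  simp only [solution, solution_alt]
  rw [← PySem.Dict.counter_eq_foldl, PySem.List.foldl_append_singleton_eq_map]
  exact List.map_congr_left (fun g hg => ranks_getD grades g hg)
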